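-- pv_equiv track=rewrite | github.com/rolaechea/ml-traces-analysis | ConfigurationUtilities.py | transformBitsetToIncludeFeatureCubes
-- ===== SOURCE A (Python) =====
-- def transformBitsetToIncludeFeatureCubes(X):
--     """
--   Given a vector of bitmaps representing examples x_0, .... x_n
--     Creates a corresponding vector of bitmaps including all possible square combinations X_i * x_J where i < j ordered by i and then j,
--     and all possible triplets combinations X_i * X_J * X_K with i < j < k
--     """
--     transformedX = []
--     for originalFeatureSet in X:
--         Squares = []
--         for a, indexA in zip(originalFeatureSet, range(0, len(originalFeatureSet))):
--             for b in originalFeatureSet[indexA+1:]: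
--                 Squares.extend([a*b])
--
--         startSquaresIndex = 0
--
--         # Add cubes, note x_i will only multiply pairs x_j * xK if j>i and k > j.
--         Triplets = []
--         for a, indexA in zip(originalFeatureSet, range(0, len(originalFeatureSet))):
--             startSquaresIndex = startSquaresIndex + len(originalFeatureSet[indexA+1:])
--             for b  in Squares[startSquaresIndex:]:
--                 Triplets.extend([a*b])
--
--
--         jointFeatureSet =  originalFeatureSet + Squares + Triplets
--         transformedX.extend([jointFeatureSet])
--
--     return transformedX
-- ===== SOURCE B (Python) =====
-- def transformBitsetToIncludeFeatureCubes(X):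
--     return [
--         x
--         + [x[i] * x[j]
--            for i in range(len(x)) for j in range(i + 1, len(x))]
--         + [x[i] * (x[j] * x[k])
--            for i in range(len(x)) for j in range(i + 1, len(x)) for k in range(j + 1, len(x))]
--         for x in X
--     ]
-- ===== Notes on version B (the rewrite author's own statement) =====
-- stated objective: simpler
-- what changed: A builds the Squares list via list slicing and then reads the triplet factors back out of the Squares list at a running start index; B computes pairwise and triple products directly by index comprehensions over i<j and i<j<k without reusing or slicing the Squares table.
import Mathlib
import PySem

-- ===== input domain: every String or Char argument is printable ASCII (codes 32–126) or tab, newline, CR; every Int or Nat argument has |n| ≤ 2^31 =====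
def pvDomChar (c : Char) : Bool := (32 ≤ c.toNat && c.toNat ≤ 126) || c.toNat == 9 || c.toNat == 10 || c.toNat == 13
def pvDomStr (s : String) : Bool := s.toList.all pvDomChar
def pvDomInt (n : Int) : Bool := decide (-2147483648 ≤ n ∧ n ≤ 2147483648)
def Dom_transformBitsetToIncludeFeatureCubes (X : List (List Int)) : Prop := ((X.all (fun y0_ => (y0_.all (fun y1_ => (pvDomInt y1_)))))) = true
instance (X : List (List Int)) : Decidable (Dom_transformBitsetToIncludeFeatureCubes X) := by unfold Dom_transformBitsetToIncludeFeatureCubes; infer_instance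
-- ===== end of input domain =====

-- B replaces A's slice-and-reuse construction (triplets read back out of the Squares
-- list at a running start index) by direct index comprehensions over i<j and i<j<k;
-- objective: simpler.

-- ===== PORT A =====
-- literal transliteration of A: outer foldl with extend, Squares built by slicing,
-- Triplets built by re-slicing the Squares list at a running start index
def transformBitsetToIncludeFeatureCubes (X : List (List Int)) : List (List Int) :=
  X.foldl (fun transformedX originalFeatureSet =>
    let Squares : List Int :=
      (originalFeatureSet.zipIdx).foldl (fun sq p =>
        (PySem.List.slice originalFeatureSet (some ((p.2 : Int) + 1)) none).foldl
          (fun s b => s ++ [p.1 * b]) sq) []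
    let Triplets : List Int :=
      ((originalFeatureSet.zipIdx).foldl (fun st p =>
        let start' := st.1 + ((PySem.List.slice originalFeatureSet (some ((p.2 : Int) + 1)) none).length : Int)
        (start', (PySem.List.slice Squares (some start') none).foldl
          (fun s b => s ++ [p.1 * b]) st.2)) ((0 : Int), ([] : List Int))).2
    transformedX ++ [originalFeatureSet ++ Squares ++ Triplets]) []

-- ===== PORT B =====
-- literal transliteration of Source B: per row, index comprehensions over i<j and i<j<k;
-- x[i] (indices always in range here) ported as pyGetD x i 0
def transformBitsetToIncludeFeatureCubes_alt (X : List (List Int)) : List (List Int) :=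
  X.map (fun x =>
    let n : Int := (x.length : Int)
    x ++ ((PySem.List.pyRange 0 n 1).flatMap (fun i =>
            (PySem.List.pyRange (i + 1) n 1).map (fun j =>
              PySem.List.pyGetD x i 0 * PySem.List.pyGetD x j 0)))
      ++ ((PySem.List.pyRange 0 n 1).flatMap (fun i =>
            (PySem.List.pyRange (i + 1) n 1).flatMap (fun j =>
              (PySem.List.pyRange (j + 1) n 1).map (fun k =>
                PySem.List.pyGetD x i 0 * (PySem.List.pyGetD x j 0 * PySem.List.pyGetD x k 0))))))

-- ===== PRECONDITION & SPEC =====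
def Spec_transformBitsetToIncludeFeatureCubes (X : List (List Int)) (out : List (List Int)) : Prop := out = transformBitsetToIncludeFeatureCubes_alt X
instance (X : List (List Int)) (out : List (List Int)) : Decidable (Spec_transformBitsetToIncludeFeatureCubes X out) := by unfold Spec_transformBitsetToIncludeFeatureCubes; infer_instance

-- ===== CLAIM (what is proved, stated in full; the proofs are below) =====
def Claim_equal_transformBitsetToIncludeFeatureCubes : Prop := ∀ (X : List (List Int)), Dom_transformBitsetToIncludeFeatureCubes X → Spec_transformBitsetToIncludeFeatureCubes X (transformBitsetToIncludeFeatureCubes X)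

-- ===== LEMMAS AND PROOFS =====

-- reference forms: pairwise products (i<j) and triple products (i<j<k) of a row
def pvSq : List Int → List Int
  | [] => []
  | a :: r => r.map (fun b => a * b) ++ pvSq r

def pvTr : List Int → List Int
  | [] => []
  | a :: r => (pvSq r).map (fun b => a * b) ++ pvTr r

-- 'acc.extend([f b])' folded over a list is acc ++ map f
theorem pvFoldPush {α : Type} (f : α → Int) :
    ∀ (l : List α) (init : List Int),
      l.foldl (fun acc b => acc ++ [f b]) init = init ++ l.map f := by
  intro l
  induction l with
  | nil => simp
  | cons a t ih => intro init; simp [List.foldl_cons, ih]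

-- pvSq of a suffix is a suffix of pvSq
theorem pvSq_suffix (x : List Int) : ∀ (m : Nat), ∃ p, pvSq x = p ++ pvSq (x.drop m) := by
  induction x with
  | nil => intro m; exact ⟨[], by simp⟩
  | cons a r ih =>
    intro m
    cases m with
    | zero => exact ⟨[], by simp⟩
    | succ m =>
      obtain ⟨p, hp⟩ := ih m
      exact ⟨r.map (fun b => a * b) ++ p, by simp [pvSq, hp]⟩

-- A's Squares fold computes pvSq
theorem pvSqA (x : List Int) :
    ∀ (t : List Int) (k : Nat) (acc : List Int), x.drop k = t →
      (t.zipIdx k).foldl (fun sq p =>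
        (PySem.List.slice x (some ((p.2 : Int) + 1)) none).foldl
          (fun s b => s ++ [p.1 * b]) sq) acc = acc ++ pvSq t := by
  intro t
  induction t with
  | nil => intro k acc h; simp [pvSq]
  | cons a t' ih =>
    intro k acc h
    have hdrop : x.drop (k + 1) = t' := by
      have := congrArg List.tail h
      simpa [List.tail_drop] using this
    have hslice : PySem.List.slice x (some ((k : Int) + 1)) none = t' := by
      have : ((k : Int) + 1) = ((k + 1 : Nat) : Int) := by push_cast; ring
      rw [this, PySem.List.slice_from_natCast, hdrop]
    simp only [List.zipIdx_cons, List.foldl_cons, hslice]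
    rw [pvFoldPush (fun b => a * b), ih (k + 1) _ hdrop]
    simp [pvSq]

-- A's Triplets fold computes pvTr
theorem pvTrA (x : List Int) :
    ∀ (t : List Int) (k : Nat) (acc : List Int) (start : Int), x.drop k = t →
      start = ((pvSq x).length : Int) - ((pvSq t).length : Int) →
      ((t.zipIdx k).foldl (fun st p =>
        let start' := st.1 + ((PySem.List.slice x (some ((p.2 : Int) + 1)) none).length : Int)
        (start', (PySem.List.slice (pvSq x) (some start') none).foldl
          (fun s b => s ++ [p.1 * b]) st.2)) (start, acc)).2 = acc ++ pvTr t := by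
  intro t
  induction t with
  | nil => intro k acc start h hs; simp [pvTr]
  | cons a t' ih =>
    intro k acc start h hs
    have hdrop : x.drop (k + 1) = t' := by
      have := congrArg List.tail h
      simpa [List.tail_drop] using this
    have hslice : PySem.List.slice x (some ((k : Int) + 1)) none = t' := by
      have : ((k : Int) + 1) = ((k + 1 : Nat) : Int) := by push_cast; ring
      rw [this, PySem.List.slice_from_natCast, hdrop]
    obtain ⟨p, hp⟩ := pvSq_suffix x (k + 1)
    rw [hdrop] at hp
    have hstart' : start + ((PySem.List.slice x (some ((k : Int) + 1)) none).length : Int)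
        = ((p.length : Nat) : Int) := by
      rw [hslice, hs, hp]
      simp only [pvSq, List.length_append, List.length_map]
      push_cast
      omega
    have hslice2 : PySem.List.slice (pvSq x) (some (start + ((PySem.List.slice x (some ((k : Int) + 1)) none).length : Int))) none = pvSq t' := by
      rw [hstart', PySem.List.slice_from_natCast, hp]
      simp
    simp only [List.zipIdx_cons, List.foldl_cons, hslice2]
    rw [pvFoldPush (fun b => a * b)]
    rw [ih (k + 1) _ _ hdrop ?_]
    · simp [pvTr]
    · rw [hstart', hp]
      simp only [List.length_append]
      push_cast
      omega

-- B's double comprehension from start index m computes pvSq of the suffix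
theorem pvSqB (x : List Int) :
    ∀ (fuel m : Nat), x.length - m ≤ fuel →
      (PySem.List.pyRange (m : Int) (x.length : Int) 1).flatMap (fun i =>
        (PySem.List.pyRange (i + 1) (x.length : Int) 1).map (fun j =>
          PySem.List.pyGetD x i 0 * PySem.List.pyGetD x j 0)) = pvSq (x.drop m) := by
  intro fuel
  induction fuel with
  | zero =>
    intro m hm
    have h : x.length ≤ m := by omega
    rw [PySem.List.pyRange_one_eq_nil (by exact_mod_cast h), List.drop_eq_nil_of_le h]
    simp [pvSq]
  | succ fuel ih =>
    intro m hm
    by_cases h : x.length ≤ m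
    · rw [PySem.List.pyRange_one_eq_nil (by exact_mod_cast h), List.drop_eq_nil_of_le h]
      simp [pvSq]
    · have hlt : m < x.length := by omega
      rw [PySem.List.pyRange_one_cons (by exact_mod_cast hlt), List.flatMap_cons]
      have hcast : ((m : Int) + 1) = ((m + 1 : Nat) : Int) := by push_cast; ring
      have hinner : (PySem.List.pyRange ((m : Int) + 1) (x.length : Int) 1).map (fun j =>
          PySem.List.pyGetD x (m : Int) 0 * PySem.List.pyGetD x j 0)
          = ((PySem.List.pyRange ((m : Int) + 1) (x.length : Int) 1).map (fun j =>
              PySem.List.pyGetD x j 0)).map (fun b => PySem.List.pyGetD x (m : Int) 0 * b) := by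
        rw [List.map_map]; rfl
      rw [hinner, PySem.List.map_pyGetD_pyRange' x 0 (by positivity), hcast,
        ih (m + 1) (by omega)]
      have hget : PySem.List.pyGetD x (m : Int) 0 = x[m] := by
        rw [PySem.List.pyGetD_eq_getElem x 0 (by positivity) (by exact_mod_cast hlt)]
        simp
      simp only [Int.toNat_natCast]
      rw [hget, List.drop_eq_getElem_cons hlt]
      simp [pvSq]

-- B's triple comprehension from start index m computes pvTr of the suffix
theorem pvTrB (x : List Int) :
    ∀ (fuel m : Nat), x.length - m ≤ fuel →
      (PySem.List.pyRange (m : Int) (x.length : Int) 1).flatMap (fun i =>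
        (PySem.List.pyRange (i + 1) (x.length : Int) 1).flatMap (fun j =>
          (PySem.List.pyRange (j + 1) (x.length : Int) 1).map (fun k =>
            PySem.List.pyGetD x i 0 * (PySem.List.pyGetD x j 0 * PySem.List.pyGetD x k 0)))) = pvTr (x.drop m) := by
  intro fuel
  induction fuel with
  | zero =>
    intro m hm
    have h : x.length ≤ m := by omega
    rw [PySem.List.pyRange_one_eq_nil (by exact_mod_cast h), List.drop_eq_nil_of_le h]
    simp [pvTr]
  | succ fuel ih =>
    intro m hm
    by_cases h : x.length ≤ m
    · rw [PySem.List.pyRange_one_eq_nil (by exact_mod_cast h), List.drop_eq_nil_of_le h]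
      simp [pvTr]
    · have hlt : m < x.length := by omega
      rw [PySem.List.pyRange_one_cons (by exact_mod_cast hlt), List.flatMap_cons]
      have hcast : ((m : Int) + 1) = ((m + 1 : Nat) : Int) := by push_cast; ring
      have hinner : (PySem.List.pyRange ((m : Int) + 1) (x.length : Int) 1).flatMap (fun j =>
          (PySem.List.pyRange (j + 1) (x.length : Int) 1).map (fun k =>
            PySem.List.pyGetD x (m : Int) 0 * (PySem.List.pyGetD x j 0 * PySem.List.pyGetD x k 0)))
          = ((PySem.List.pyRange ((m : Int) + 1) (x.length : Int) 1).flatMap (fun j =>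
              (PySem.List.pyRange (j + 1) (x.length : Int) 1).map (fun k =>
                PySem.List.pyGetD x j 0 * PySem.List.pyGetD x k 0))).map
              (fun b => PySem.List.pyGetD x (m : Int) 0 * b) := by
        rw [List.map_flatMap]
        simp only [List.map_map]
        rfl
      rw [hinner, hcast, pvSqB x (x.length - (m + 1)) (m + 1) le_rfl,
        ih (m + 1) (by omega)]
      have hget : PySem.List.pyGetD x (m : Int) 0 = x[m] := by
        rw [PySem.List.pyGetD_eq_getElem x 0 (by positivity) (by exact_mod_cast hlt)]
        simp
      rw [hget, List.drop_eq_getElem_cons hlt]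
      simp [pvTr]

-- per-row equality of the two ports
theorem pvRow_eq (x : List Int) :
    (x ++ (x.zipIdx).foldl (fun sq p =>
        (PySem.List.slice x (some ((p.2 : Int) + 1)) none).foldl
          (fun s b => s ++ [p.1 * b]) sq) []
       ++ ((x.zipIdx).foldl (fun st p =>
        let start' := st.1 + ((PySem.List.slice x (some ((p.2 : Int) + 1)) none).length : Int)
        (start', (PySem.List.slice ((x.zipIdx).foldl (fun sq p =>
            (PySem.List.slice x (some ((p.2 : Int) + 1)) none).foldl
              (fun s b => s ++ [p.1 * b]) sq) []) (some start') none).foldl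
          (fun s b => s ++ [p.1 * b]) st.2)) ((0 : Int), ([] : List Int))).2)
    = x ++ ((PySem.List.pyRange 0 (x.length : Int) 1).flatMap (fun i =>
            (PySem.List.pyRange (i + 1) (x.length : Int) 1).map (fun j =>
              PySem.List.pyGetD x i 0 * PySem.List.pyGetD x j 0)))
      ++ ((PySem.List.pyRange 0 (x.length : Int) 1).flatMap (fun i =>
            (PySem.List.pyRange (i + 1) (x.length : Int) 1).flatMap (fun j =>
              (PySem.List.pyRange (j + 1) (x.length : Int) 1).map (fun k =>
                PySem.List.pyGetD x i 0 * (PySem.List.pyGetD x j 0 * PySem.List.pyGetD x k 0))))) := by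
  have hsq := pvSqA x x 0 [] rfl
  rw [hsq]
  have htr := pvTrA x x 0 [] 0 rfl (by simp)
  simp only [List.nil_append] at hsq htr ⊢
  rw [htr]
  have hB2 := pvSqB x x.length 0 (by omega)
  have hB3 := pvTrB x x.length 0 (by omega)
  simp only [Nat.cast_zero, List.drop_zero] at hB2 hB3
  rw [hB2, hB3]

-- ===== VERDICT (by name: the statement is the Claim_ definition above) =====
theorem transformBitsetToIncludeFeatureCubes_spec : Claim_equal_transformBitsetToIncludeFeatureCubes := by
  intro X hd
  clear hd
  show transformBitsetToIncludeFeatureCubes X = transformBitsetToIncludeFeatureCubes_alt X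
  unfold transformBitsetToIncludeFeatureCubes transformBitsetToIncludeFeatureCubes_alt
  suffices h : ∀ (acc : List (List Int)),
      X.foldl (fun transformedX originalFeatureSet =>
        let Squares : List Int :=
          (originalFeatureSet.zipIdx).foldl (fun sq p =>
            (PySem.List.slice originalFeatureSet (some ((p.2 : Int) + 1)) none).foldl
              (fun s b => s ++ [p.1 * b]) sq) []
        let Triplets : List Int :=
          ((originalFeatureSet.zipIdx).foldl (fun st p =>
            let start' := st.1 + ((PySem.List.slice originalFeatureSet (some ((p.2 : Int) + 1)) none).length : Int)
            (start', (PySem.List.slice Squares (some start') none).foldl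
              (fun s b => s ++ [p.1 * b]) st.2)) ((0 : Int), ([] : List Int))).2
        transformedX ++ [originalFeatureSet ++ Squares ++ Triplets]) acc
      = acc ++ X.map (fun x =>
          let n : Int := (x.length : Int)
          x ++ ((PySem.List.pyRange 0 n 1).flatMap (fun i =>
                  (PySem.List.pyRange (i + 1) n 1).map (fun j =>
                    PySem.List.pyGetD x i 0 * PySem.List.pyGetD x j 0)))
            ++ ((PySem.List.pyRange 0 n 1).flatMap (fun i =>
                  (PySem.List.pyRange (i + 1) n 1).flatMap (fun j =>
                    (PySem.List.pyRange (j + 1) n 1).map (fun k =>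
                      PySem.List.pyGetD x i 0 * (PySem.List.pyGetD x j 0 * PySem.List.pyGetD x k 0)))))) by
    simpa using h []
  induction X with
  | nil => intro acc; simp
  | cons x t ih =>
    intro acc
    simp only [List.foldl_cons, List.map_cons]
    rw [ih]
    rw [pvRow_eq x]
    simp
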